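-- pv_equiv track=rewrite | github.com/NicolaasZA/adventofcode | src/2023/11/shared.py | convert
-- ===== SOURCE A (Python) =====
-- def convert(raw: list[list[str]]) -> tuple[list[list[int]], int]:
--     chart = []
--     uid = 1
--     for y in range(0, len(raw)):
--         chart.append([])
--         for x in range(0, len(raw[y])):
--             if raw[y][x] == '#':
--                 chart[y].append(uid)
--                 uid += 1
--             else:
--                 chart[y].append(0)
--     return chart, uid
-- ===== SOURCE B (Python) =====
-- def convert(raw: list[list[str]]) -> tuple[list[list[int]], int]:
--     # flatten -> prefix sums -> per-cell ids -> reshape by slicing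
--     flat = [c == '#' for row in raw for c in row]
--     pref = [0]
--     for b in flat:
--         pref.append(pref[-1] + (1 if b else 0))
--     ids = [p if b else 0 for b, p in zip(flat, pref[1:])]
--     chart = []
--     pos = 0
--     for row in raw:
--         chart.append(ids[pos:pos + len(row)])
--         pos += len(row)
--     return chart, pref[-1] + 1
-- ===== Notes on version B (the rewrite author's own statement) =====
-- stated objective: alternative
-- what changed: Replaces the index-based nested loops threading a mutable uid counter with a flatten / prefix-sum / zip / reshape-by-slicing pipeline: galaxies get their id from a precomputed prefix-sum list and the grid shape is restored by slicing the flat id list per row.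
import Mathlib
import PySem

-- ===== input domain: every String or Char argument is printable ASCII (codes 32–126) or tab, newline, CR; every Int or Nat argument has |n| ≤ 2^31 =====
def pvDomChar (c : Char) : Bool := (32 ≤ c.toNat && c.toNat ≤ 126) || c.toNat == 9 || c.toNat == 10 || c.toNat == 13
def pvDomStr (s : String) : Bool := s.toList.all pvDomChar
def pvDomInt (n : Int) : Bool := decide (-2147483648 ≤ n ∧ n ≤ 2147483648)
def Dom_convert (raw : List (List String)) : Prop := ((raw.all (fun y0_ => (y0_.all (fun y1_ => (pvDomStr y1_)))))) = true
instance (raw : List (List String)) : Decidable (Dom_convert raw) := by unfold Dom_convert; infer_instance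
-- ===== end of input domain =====

-- B replaces A's nested index loops threading a mutable uid counter by a
-- flatten / prefix-sum / zip / reshape-by-slicing pipeline (alternative decomposition, same cost).

-- ===== PORT A =====
-- inner loop body: append uid or 0 to the current row, bumping uid on '#'
def aCellF (st2 : List Int × Int) (c : String) : List Int × Int :=
  if c == "#" then (st2.1 ++ [st2.2], st2.2 + 1) else (st2.1 ++ [(0 : Int)], st2.2)

def aCellStep (rawy : List String) (st2 : List Int × Int) (x : Int) : List Int × Int :=
  aCellF st2 (PySem.List.pyGetD rawy x "")

-- outer loop body: chart.append([]) then fill chart[y] cell by cell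
def aRowStep (raw : List (List String)) (st : List (List Int) × Int) (y : Int) :
    List (List Int) × Int :=
  let rawy := PySem.List.pyGetD raw y []
  let inner := (PySem.List.pyRange 0 (rawy.length : Int) 1).foldl (aCellStep rawy) ([], st.2)
  (st.1 ++ [inner.1], inner.2)

def convert (raw : List (List String)) : List (List Int) × Int :=
  (PySem.List.pyRange 0 (raw.length : Int) 1).foldl (aRowStep raw) ([], 1)

-- ===== PORT B =====
-- pref.append(pref[-1] + (1 if b else 0))
def bPrefStep (p : List Int) (b : Bool) : List Int :=
  p ++ [PySem.List.pyGetD p (-1) 0 + (if b then 1 else 0)]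

-- chart.append(ids[pos:pos+len(row)]); pos += len(row)
def bChunkStep (ids : List Int) (st : List (List Int) × Int) (row : List String) :
    List (List Int) × Int :=
  (st.1 ++ [PySem.List.slice ids (some st.2) (some (st.2 + (row.length : Int)))],
   st.2 + (row.length : Int))

def convert_alt (raw : List (List String)) : List (List Int) × Int :=
  let flat := raw.flatMap (fun row => row.map (fun c => c == "#"))
  let pref := flat.foldl bPrefStep [(0 : Int)]
  let ids := (flat.zip (pref.drop 1)).map (fun bp => if bp.1 then bp.2 else 0)
  let st := raw.foldl (bChunkStep ids) (([] : List (List Int)), (0 : Int))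
  (st.1, PySem.List.pyGetD pref (-1) 0 + 1)

-- ===== PRECONDITION & SPEC =====
def Spec_convert (raw : List (List String)) (out : List (List Int) × Int) : Prop := out = convert_alt raw
instance (raw : List (List String)) (out : List (List Int) × Int) : Decidable (Spec_convert raw out) := by unfold Spec_convert; infer_instance

-- ===== CLAIM (what is proved, stated in full; the proofs are below) =====
def Claim_equal_convert : Prop := ∀ (raw : List (List String)), Dom_convert raw → Spec_convert raw (convert raw)

-- ===== LEMMAS AND PROOFS =====

-- common reference semantics: structural recursion threading uid
def rowGo (uid : Int) : List String → List Int × Int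
  | [] => ([], uid)
  | c :: cs =>
    if c == "#" then
      let r := rowGo (uid + 1) cs; (uid :: r.1, r.2)
    else
      let r := rowGo uid cs; ((0 : Int) :: r.1, r.2)

def gridGo (uid : Int) : List (List String) → List (List Int) × Int
  | [] => ([], uid)
  | r :: rs =>
    let a := rowGo uid r
    let g := gridGo a.2 rs
    (a.1 :: g.1, g.2)

-- boolean mask of a row / grid
def bools (row : List String) : List Bool := row.map (fun c => c == "#")
def gbools (rows : List (List String)) : List Bool :=
  rows.flatMap (fun row => row.map (fun c => c == "#"))

def cntI (l : List Bool) : Int := ((l.count true : Nat) : Int)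

def scanFrom (s : Int) : List Bool → List Int
  | [] => []
  | b :: bs => (s + (if b then 1 else 0)) :: scanFrom (s + (if b then 1 else 0)) bs

def idsOf (s : Int) : List Bool → List Int
  | [] => []
  | b :: bs => (if b then s + 1 else 0) :: idsOf (s + (if b then 1 else 0)) bs

-- ===== A-side =====

theorem aCell_foldl (row : List String) :
    ∀ (acc : List Int) (uid : Int),
      row.foldl aCellF (acc, uid)
      = (acc ++ (rowGo uid row).1, (rowGo uid row).2) := by
  induction row with
  | nil => intro acc uid; simp [rowGo]
  | cons c cs ih =>
    intro acc uid
    by_cases h : c = "#" <;> simp [rowGo, aCellF, h, ih]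

theorem aRow_eq (raw : List (List String)) (st : List (List Int) × Int) (y : Int)
    (h : PySem.Raise.InRange raw.length y) :
    aRowStep raw st y =
      (st.1 ++ [(rowGo st.2 (PySem.List.pyGetD raw y [])).1],
       (rowGo st.2 (PySem.List.pyGetD raw y [])).2) := by
  simp only [aRowStep]
  rw [show (aCellStep (PySem.List.pyGetD raw y []))
      = fun st2 x => aCellF st2 (PySem.List.pyGetD (PySem.List.pyGetD raw y []) x "") from rfl]
  rw [PySem.List.foldl_pyRange_zero_pyGetD' (PySem.List.pyGetD raw y []) "" aCellF]
  rw [aCell_foldl]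
  simp

theorem a_grid_foldl (rows : List (List String)) :
    ∀ (acc : List (List Int)) (uid : Int),
      rows.foldl (fun st r =>
          (st.1 ++ [(rowGo st.2 r).1], (rowGo st.2 r).2)) (acc, uid)
      = (acc ++ (gridGo uid rows).1, (gridGo uid rows).2) := by
  induction rows with
  | nil => intro acc uid; simp [gridGo]
  | cons r rs ih =>
    intro acc uid
    simp [gridGo, ih]

theorem convert_eq_gridGo (raw : List (List String)) :
    convert raw = gridGo 1 raw := by
  unfold convert
  have hcongr : (PySem.List.pyRange 0 (raw.length : Int) 1).foldl (aRowStep raw) ([], 1)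
      = (PySem.List.pyRange 0 (raw.length : Int) 1).foldl
          (fun st y => (st.1 ++ [(rowGo st.2 (PySem.List.pyGetD raw y [])).1],
                        (rowGo st.2 (PySem.List.pyGetD raw y [])).2)) ([], 1) := by
    apply PySem.List.foldl_congr_mem
    intro st y hy
    have hmem := (PySem.List.mem_pyRange_one).1 hy
    exact aRow_eq raw st y (by unfold PySem.Raise.InRange; omega)
  rw [hcongr]
  rw [PySem.List.foldl_pyRange_zero_pyGetD' raw ([] : List String)
    (fun st r => (st.1 ++ [(rowGo st.2 r).1], (rowGo st.2 r).2))]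
  rw [a_grid_foldl]
  simp

-- ===== B-side =====

theorem bPref_foldl (l : List Bool) :
    ∀ (p : List Int) (h : p ≠ []),
      l.foldl bPrefStep p = p ++ scanFrom (p.getLast h) l := by
  induction l with
  | nil => intro p h; simp [scanFrom]
  | cons b bs ih =>
    intro p h
    simp only [List.foldl_cons, bPrefStep]
    rw [PySem.List.pyGetD_neg_one (h := h)]
    rw [ih _ (by simp)]
    rw [List.getLast_append]
    simp [scanFrom]

theorem scan_getLast (l : List Bool) :
    ∀ (s : Int) (h : (s :: scanFrom s l) ≠ []),
      (s :: scanFrom s l).getLast h = s + cntI l := by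
  induction l with
  | nil => intro s h; simp [scanFrom, cntI]
  | cons b bs ih =>
    intro s h
    show (s :: (s + (if b then 1 else 0)) :: scanFrom (s + (if b then 1 else 0)) bs).getLast _ = _
    rw [List.getLast_cons (by simp)]
    rw [ih (s + (if b then 1 else 0)) (by simp)]
    unfold cntI
    cases b <;> simp [List.count_cons] <;> omega

theorem zip_scan_ids (l : List Bool) :
    ∀ (s : Int),
      ((l.zip (scanFrom s l)).map (fun bp => if bp.1 then bp.2 else 0)) = idsOf s l := by
  induction l with
  | nil => intro s; simp [scanFrom, idsOf]
  | cons b bs ih =>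
    intro s
    show ((b, s + (if b then 1 else 0)) :: (bs.zip (scanFrom (s + (if b then 1 else 0)) bs))).map _ = _
    simp only [List.map_cons, ih]
    cases b <;> simp [idsOf]

theorem idsOf_length (l : List Bool) : ∀ s, (idsOf s l).length = l.length := by
  induction l with
  | nil => intro s; simp [idsOf]
  | cons b bs ih => intro s; simp [idsOf, ih]

theorem idsOf_append (l1 l2 : List Bool) :
    ∀ s, idsOf s (l1 ++ l2) = idsOf s l1 ++ idsOf (s + cntI l1) l2 := by
  induction l1 with
  | nil => intro s; simp [idsOf, cntI]
  | cons b bs ih =>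
    intro s
    simp only [List.cons_append, idsOf, ih, List.cons.injEq, true_and]
    have : s + (if b then 1 else 0) + cntI bs = s + cntI (b :: bs) := by
      unfold cntI; cases b <;> simp [List.count_cons] <;> omega
    rw [this]

theorem rowGo_eq_idsOf (row : List String) :
    ∀ (s : Int),
      rowGo (s + 1) row = (idsOf s (bools row), s + cntI (bools row) + 1) := by
  induction row with
  | nil => intro s; simp [rowGo, bools, idsOf, cntI]
  | cons c cs ih =>
    intro s
    by_cases h : c == "#"
    · have : (s + 1) + 1 = (s + 1) + 1 := rfl
      simp only [rowGo, h, if_true]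
      rw [show (s + 1) + 1 = (s + (1:Int)) + 1 from rfl, ih (s + 1)]
      simp [bools, idsOf, h, cntI, List.count_cons]
      push_cast; ring
    · simp only [rowGo, h, if_false]
      rw [ih s]
      simp [bools, idsOf, h, cntI, List.count_cons]

theorem gridGo_snd (rows : List (List String)) :
    ∀ s, (gridGo (s + 1) rows).2 = s + cntI (gbools rows) + 1 := by
  induction rows with
  | nil => intro s; simp [gridGo, gbools, cntI]
  | cons r rs ih =>
    intro s
    simp only [gridGo, rowGo_eq_idsOf]
    rw [ih (s + cntI (bools r))]
    unfold gbools cntI bools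
    simp [List.count_append]
    push_cast; ring

theorem bChunk_foldl (rows : List (List String)) :
    ∀ (pre : List Int) (acc : List (List Int)) (s : Int) (tail : List Int),
      tail = idsOf s (gbools rows) →
      rows.foldl (bChunkStep (pre ++ tail)) (acc, (pre.length : Int))
        = (acc ++ (gridGo (s + 1) rows).1, (pre.length : Int) + ((gbools rows).length : Int)) := by
  induction rows with
  | nil =>
    intro pre acc s tail ht
    simp [gridGo, gbools]
  | cons r rs ih =>
    intro pre acc s tail ht
    have hsplit : gbools (r :: rs) = bools r ++ gbools rs := by
      simp [gbools, bools]
    rw [hsplit, idsOf_append] at ht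
    simp only [List.foldl_cons]
    have hlen : (idsOf s (bools r)).length = r.length := by
      rw [idsOf_length]; simp [bools]
    have hsl : PySem.List.slice (pre ++ tail) (some (pre.length : Int))
        (some ((pre.length : Int) + (r.length : Int)))
        = idsOf s (bools r) := by
      rw [ht, PySem.List.slice_natCast_add, List.drop_left, List.take_left' hlen]
    have hstep : bChunkStep (pre ++ tail) (acc, (pre.length : Int)) r
        = (acc ++ [idsOf s (bools r)], ((pre ++ idsOf s (bools r)).length : Int)) := by
      unfold bChunkStep
      simp [hsl, hlen]
    rw [hstep]
    have hpre2 : (pre ++ idsOf s (bools r)) ++ idsOf (s + cntI (bools r)) (gbools rs)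
        = pre ++ tail := by rw [ht, List.append_assoc]
    rw [← hpre2]
    rw [ih (pre ++ idsOf s (bools r)) (acc ++ [idsOf s (bools r)]) (s + cntI (bools r)) _ rfl]
    simp only [gridGo, rowGo_eq_idsOf, hsplit]
    apply Prod.ext
    · simp
    · simp only [List.length_append, bools, List.length_map, idsOf_length]
      push_cast
      ring

theorem convert_alt_eq_gridGo (raw : List (List String)) :
    convert_alt raw = gridGo 1 raw := by
  unfold convert_alt
  have hpref : (gbools raw).foldl bPrefStep [(0 : Int)]
      = [(0 : Int)] ++ scanFrom 0 (gbools raw) := by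
    rw [bPref_foldl (gbools raw) [(0 : Int)] (by simp)]
    simp
  show ((raw.foldl (bChunkStep _) ([], 0)).1, _) = _
  rw [show raw.flatMap (fun row => row.map (fun c => c == "#")) = gbools raw from rfl]
  rw [hpref]
  have hids : ((gbools raw).zip (([(0 : Int)] ++ scanFrom 0 (gbools raw)).drop 1)).map
      (fun bp => if bp.1 then bp.2 else 0) = idsOf 0 (gbools raw) := by
    simp only [List.singleton_append, List.drop_succ_cons, List.drop_zero]
    exact zip_scan_ids (gbools raw) 0
  rw [hids]
  have hchunk := bChunk_foldl raw [] [] 0 (idsOf 0 (gbools raw)) rfl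
  simp only [List.nil_append, List.length_nil, Int.natCast_zero] at hchunk
  rw [hchunk]
  have hlast : PySem.List.pyGetD ([(0 : Int)] ++ scanFrom 0 (gbools raw)) (-1) 0
      = 0 + cntI (gbools raw) := by
    rw [PySem.List.pyGetD_neg_one (h := by simp)]
    exact scan_getLast (gbools raw) 0 (by simp)
  rw [hlast]
  have hsnd := gridGo_snd raw 0
  simp only [show (0:Int)+1 = 1 from rfl] at hsnd
  apply Prod.ext
  · norm_num
  · simp [hsnd]

-- ===== VERDICT (by name: the statement is the Claim_ definition above) =====
theorem convert_spec : Claim_equal_convert := by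
  intro raw _
  unfold Spec_convert
  rw [convert_eq_gridGo, convert_alt_eq_gridGo]
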